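-- pv_equiv track=rewrite | github.com/gabriellaec/desoft-analise-exercicios | backup/user_392/ch92_2019_10_02_17_18_43_310594.py | simplifica_dict
-- ===== SOURCE A (Python) =====
-- def simplifica_dict(x):
--     lista = []
--     lista_certa = []
--     for e,k in x.items():
--         if e in lista:
--             lista.append(0)
--         else:
--             lista.append(e)
--         if k in  lista:
--             lista.append(0)
--         else:
--             lista.append(k)
--     for zero in lista:
--         if zero == 0:
--             del zero
--         else:
--             lista_certa.append(zero)
--     return lista_certa
-- ===== SOURCE B (Python) =====
-- def simplifica_dict(x):
--     lista_certa = []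
--     for par in x.items():
--         for v in par:
--             if v != 0 and v not in lista_certa:
--                 lista_certa.append(v)
--     return lista_certa
-- ===== Notes on version B (the rewrite author's own statement) =====
-- stated objective: simpler
-- what changed: Replaces A's two-pass design (build a 0-padded intermediate list with sentinel markers for duplicates, then a second loop filtering the zeros out) by one pass over the items that appends each nonzero, not-yet-seen value directly to the result.
import Mathlib
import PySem

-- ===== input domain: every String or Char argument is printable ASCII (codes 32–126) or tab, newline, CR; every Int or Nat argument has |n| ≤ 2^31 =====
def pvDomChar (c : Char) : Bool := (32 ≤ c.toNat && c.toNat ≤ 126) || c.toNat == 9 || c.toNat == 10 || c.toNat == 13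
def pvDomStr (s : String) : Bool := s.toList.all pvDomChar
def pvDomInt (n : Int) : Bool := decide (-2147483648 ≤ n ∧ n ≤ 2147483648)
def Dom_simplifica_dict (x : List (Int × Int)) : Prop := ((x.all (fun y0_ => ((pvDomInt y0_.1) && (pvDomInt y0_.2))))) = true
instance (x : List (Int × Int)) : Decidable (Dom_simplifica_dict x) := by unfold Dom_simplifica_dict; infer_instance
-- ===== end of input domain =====

-- B replaces A's two passes (0-padded sentinel list, then a zero-dropping pass) by one direct pass; objective: simpler.

-- ===== PORT A =====
-- for e,k in x.items(): append e or a 0 sentinel, then k or a 0 sentinel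
def simplifica_dict_step (lista : List Int) (p : Int × Int) : List Int :=
  let lista1 := if p.1 ∈ lista then lista ++ [0] else lista ++ [p.1]
  if p.2 ∈ lista1 then lista1 ++ [0] else lista1 ++ [p.2]

def simplifica_dict (x : List (Int × Int)) : List Int :=
  let lista := ((PySem.Dict.ofList x).items).foldl simplifica_dict_step []
  -- second loop: keep the elements that are not 0 ('del zero' is a no-op)
  lista.foldl (fun lc z => if z = 0 then lc else lc ++ [z]) []

-- ===== PORT B =====
-- single element step: append v if nonzero and unseen
def simplifica_dict_alt_add (r : List Int) (v : Int) : List Int :=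
  if v ≠ 0 ∧ v ∉ r then r ++ [v] else r

def simplifica_dict_alt (x : List (Int × Int)) : List Int :=
  ((PySem.Dict.ofList x).items).foldl
    (fun r p => simplifica_dict_alt_add (simplifica_dict_alt_add r p.1) p.2) []

-- ===== PRECONDITION & SPEC =====
def Spec_simplifica_dict (x : List (Int × Int)) (out : List Int) : Prop := out = simplifica_dict_alt x
instance (x : List (Int × Int)) (out : List Int) : Decidable (Spec_simplifica_dict x out) := by unfold Spec_simplifica_dict; infer_instance

-- ===== CLAIM (what is proved, stated in full; the proofs are below) =====
def Claim_equal_simplifica_dict : Prop := ∀ (x : List (Int × Int)), Dom_simplifica_dict x → Spec_simplifica_dict x (simplifica_dict x)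

-- ===== LEMMAS AND PROOFS =====

-- A's second loop is a filter of the nonzero elements
lemma foldl_drop_zero (l : List Int) (acc : List Int) :
    l.foldl (fun lc z => if z = 0 then lc else lc ++ [z]) acc
      = acc ++ l.filter (fun z => decide (z ≠ 0)) := by
  induction l generalizing acc with
  | nil => simp
  | cons a t ih =>
    by_cases ha : a = 0 <;> simp [List.foldl_cons, ha, ih]

-- for a nonzero value, membership is unchanged by dropping zeros
lemma mem_filter_ne_zero {v : Int} (l : List Int) (hv : v ≠ 0) :
    v ∈ l.filter (fun z => decide (z ≠ 0)) ↔ v ∈ l := by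
  simp [List.mem_filter, hv]

-- one element of A's step, filtered, is B's add on the filtered list
lemma add_filter (l : List Int) (v : Int) :
    (if v ∈ l then l ++ [0] else l ++ [v]).filter (fun z => decide (z ≠ 0))
      = simplifica_dict_alt_add (l.filter (fun z => decide (z ≠ 0))) v := by
  unfold simplifica_dict_alt_add
  by_cases hv : v = 0
  · subst hv
    by_cases hm : (0 : Int) ∈ l <;> simp [hm, List.filter_append]
  · by_cases hm : v ∈ l
    · have hcond : ¬ (v ≠ 0 ∧ v ∉ l.filter (fun z => decide (z ≠ 0))) :=
        fun h => h.2 ((mem_filter_ne_zero l hv).mpr hm)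
      simp [hm, List.filter_append]
    · have hcond : v ≠ 0 ∧ v ∉ l.filter (fun z => decide (z ≠ 0)) :=
        ⟨hv, fun h => hm ((mem_filter_ne_zero l hv).mp h)⟩
      simp [hm, hcond, List.filter_append]

-- A's pair step, filtered, is B's pair step on the filtered list
lemma step_filter (l : List Int) (p : Int × Int) :
    (simplifica_dict_step l p).filter (fun z => decide (z ≠ 0))
      = simplifica_dict_alt_add
          (simplifica_dict_alt_add (l.filter (fun z => decide (z ≠ 0))) p.1) p.2 := by
  unfold simplifica_dict_step
  rw [← add_filter l p.1, ← add_filter _ p.2]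

-- loop invariant: B's accumulator equals A's accumulator with zeros dropped
lemma fold_filter (ps : List (Int × Int)) (l : List Int) :
    ps.foldl (fun r p => simplifica_dict_alt_add (simplifica_dict_alt_add r p.1) p.2)
        (l.filter (fun z => decide (z ≠ 0)))
      = (ps.foldl simplifica_dict_step l).filter (fun z => decide (z ≠ 0)) := by
  induction ps generalizing l with
  | nil => rfl
  | cons p t ih =>
    simp only [List.foldl_cons, ← step_filter l p]
    exact ih (simplifica_dict_step l p)

-- ===== VERDICT (by name: the statement is the Claim_ definition above) =====
theorem simplifica_dict_spec : Claim_equal_simplifica_dict := by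
  intro x _
  unfold Spec_simplifica_dict simplifica_dict simplifica_dict_alt
  rw [foldl_drop_zero, ← fold_filter]
  rfl
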